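-- pv_equiv track=rewrite | github.com/gab-es21/advent-of-code-2024 | day12/part2-wip.py | calculate_sides
-- ===== SOURCE A (Python) =====
-- def calculate_sides(region):
--     """Calculate the number of distinct fence sides for a region."""
--     sides = set()
--     for x, y in region:
--         for dx, dy in [(-1, 0), (1, 0), (0, -1), (0, 1)]:
--             nx, ny = x + dx, y + dy
--             if (x, y, nx, ny) not in sides and (nx, ny, x, y) not in sides:
--                 sides.add((x, y, nx, ny))
--     return len(sides)
-- ===== SOURCE B (Python) =====
-- def calculate_sides(region):
--     """Calculate the number of distinct fence sides for a region."""
--     cells = {(x, y) for x, y in region}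
--     total = 0
--     for x, y in cells:
--         for dx, dy in [(-1, 0), (1, 0), (0, -1), (0, 1)]:
--             if (x + dx, y + dy) in cells:
--                 total += 1
--     return 4 * len(cells) - total // 2
-- ===== Notes on version B (the rewrite author's own statement) =====
-- stated objective: simpler
-- what changed: Instead of building a deduplicated set of directed cell-to-neighbor edges and returning its size, B keeps only an integer count of internal adjacencies and returns the closed-form 4*len(cells) - total//2.
import Mathlib
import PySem

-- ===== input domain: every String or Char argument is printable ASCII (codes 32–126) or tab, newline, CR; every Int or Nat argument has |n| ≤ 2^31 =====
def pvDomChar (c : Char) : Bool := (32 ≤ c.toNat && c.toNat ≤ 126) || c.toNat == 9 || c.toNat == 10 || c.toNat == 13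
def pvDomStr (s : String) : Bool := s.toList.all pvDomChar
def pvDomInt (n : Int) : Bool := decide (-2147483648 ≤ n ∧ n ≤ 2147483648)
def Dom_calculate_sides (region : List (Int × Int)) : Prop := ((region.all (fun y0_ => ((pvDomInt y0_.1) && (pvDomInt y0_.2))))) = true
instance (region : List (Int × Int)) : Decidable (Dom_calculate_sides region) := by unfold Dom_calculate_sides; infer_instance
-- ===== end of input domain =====

-- B replaces A's deduplicated edge-set construction by a plain integer count of internal
-- adjacencies and the closed form 4*len(cells) - total//2 (objective: simpler).

-- ===== PORT A =====
def pvDirs : List (Int × Int) := [(-1, 0), (1, 0), (0, -1), (0, 1)]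

-- the body of A's outer loop: the inner 'for dx, dy in [...]' loop over one cell
def pvAStep (sides : PySem.Set (Int × Int × Int × Int)) (p : Int × Int) :
    PySem.Set (Int × Int × Int × Int) :=
  pvDirs.foldl (fun sides d =>
    let nx := p.1 + d.1
    let ny := p.2 + d.2
    if !(PySem.Set.contains sides (p.1, p.2, nx, ny)) &&
       !(PySem.Set.contains sides (nx, ny, p.1, p.2)) then
      PySem.Set.add sides (p.1, p.2, nx, ny)
    else sides) sides

def calculate_sides (region : List (Int × Int)) : Int :=
  PySem.Set.len (region.foldl pvAStep PySem.Set.empty)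

-- ===== PORT B =====
def calculate_sides_alt (region : List (Int × Int)) : Int :=
  let cells : PySem.Set (Int × Int) := PySem.Set.ofList region
  let total : Int := cells.foldl (fun total c =>
    pvDirs.foldl (fun total d =>
      if PySem.Set.contains cells (c.1 + d.1, c.2 + d.2) then total + 1 else total) total) 0
  4 * PySem.Set.len cells - PySem.Int.floordiv total 2

-- ===== PRECONDITION & SPEC =====
def Spec_calculate_sides (region : List (Int × Int)) (out : Int) : Prop := out = calculate_sides_alt region
instance (region : List (Int × Int)) (out : Int) : Decidable (Spec_calculate_sides region out) := by unfold Spec_calculate_sides; infer_instance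

-- ===== CLAIM (what is proved, stated in full; the proofs are below) =====
def Claim_equal_calculate_sides : Prop := ∀ (region : List (Int × Int)), Dom_calculate_sides region → Spec_calculate_sides region (calculate_sides region)

-- ===== LEMMAS AND PROOFS =====

def pvNbrs (c : Int × Int) : List (Int × Int) := pvDirs.map (fun d => (c.1 + d.1, c.2 + d.2))

def pvDeg (S : List (Int × Int)) (c : Int × Int) : Nat :=
  (pvNbrs c).countP (fun n => decide (n ∈ S))

def pvSumdeg (S : List (Int × Int)) : Nat := (S.map (fun c => pvDeg S c)).sum

def pvInv (S : List (Int × Int)) (E : List (Int × Int × Int × Int)) : Prop :=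
  S.Nodup ∧ E.Nodup ∧
  (∀ e ∈ E, (e.1, e.2.1) ∈ S ∧ (e.2.2.1, e.2.2.2) ∈ pvNbrs (e.1, e.2.1)) ∧
  (∀ e ∈ E, (e.2.2.1, e.2.2.2, e.1, e.2.1) ∉ E) ∧
  (∀ c ∈ S, ∀ n ∈ pvNbrs c, (c.1, c.2, n.1, n.2) ∈ E ∨ (n.1, n.2, c.1, c.2) ∈ E) ∧
  2 * E.length + pvSumdeg S = 8 * S.length

lemma pvNbrs_nodup (c : Int × Int) : (pvNbrs c).Nodup := by
  simp [pvNbrs, pvDirs, Prod.ext_iff]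

lemma pvSelf_not_nbr (c : Int × Int) : c ∉ pvNbrs c := by
  simp [pvNbrs, pvDirs, Prod.ext_iff]

lemma pvNbrs_symm (c n : Int × Int) : n ∈ pvNbrs c ↔ c ∈ pvNbrs n := by
  simp [pvNbrs, pvDirs, Prod.ext_iff]
  omega

lemma pvCountP_mem_comm (l1 l2 : List (Int × Int)) (h1 : l1.Nodup) (h2 : l2.Nodup) :
    l1.countP (fun x => decide (x ∈ l2)) = l2.countP (fun x => decide (x ∈ l1)) := by
  rw [List.countP_eq_length_filter, List.countP_eq_length_filter]
  apply List.Perm.length_eq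
  apply List.perm_of_nodup_nodup_toFinset_eq (h1.filter _) (h2.filter _)
  ext x
  simp [and_comm]

lemma pvCountP_append_one (l S : List (Int × Int)) (p : Int × Int) (hp : p ∉ S) :
    l.countP (fun x => decide (x ∈ S ++ [p]))
    = l.countP (fun x => decide (x ∈ S)) + l.countP (fun x => decide (x = p)) := by
  induction l with
  | nil => simp
  | cons a l ih =>
    simp only [List.countP_cons, ih]
    by_cases hap : a = p
    · subst hap
      simp [hp]
      omega
    · by_cases haS : a ∈ S <;> simp [haS, hap] <;> omega

lemma pvCountP_eq_ite (l : List (Int × Int)) (hl : l.Nodup) (p : Int × Int) :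
    l.countP (fun x => decide (x = p)) = if p ∈ l then 1 else 0 := by
  have hc : l.countP (fun x => decide (x = p)) = l.count p := by
    apply List.countP_congr
    intro x _
    simp
  rw [hc]
  by_cases h : p ∈ l
  · have := List.nodup_iff_count_le_one.mp hl p
    have h2 : 0 < l.count p := List.count_pos_iff.mpr h
    simp [h]; omega
  · simp [h, List.count_eq_zero_of_not_mem h]

lemma pvSum_ite (S : List (Int × Int)) (q : Int × Int → Prop) [DecidablePred q] :
    (S.map (fun c => if q c then 1 else 0)).sum = S.countP (fun c => decide (q c)) := by
  induction S with
  | nil => simp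
  | cons a S ih =>
    simp only [List.map_cons, List.sum_cons, List.countP_cons, ih]
    by_cases h : q a <;> simp [h] <;> omega

lemma pvCountP_not (l : List (Int × Int)) (f : (Int × Int) → Bool) :
    l.countP (fun x => !f x) = l.length - l.countP f := by
  induction l with
  | nil => simp
  | cons a l ih =>
    have := List.countP_le_length (l := l) (p := f)
    by_cases h : f a <;> simp [List.countP_cons, h, ih] <;> omega

lemma pvSumdeg_append (S : List (Int × Int)) (p : Int × Int) (hS : S.Nodup) (hp : p ∉ S) :
    pvSumdeg (S ++ [p]) = pvSumdeg S + 2 * pvDeg S p := by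
  have hdeg : ∀ c, pvDeg (S ++ [p]) c = pvDeg S c + (if p ∈ pvNbrs c then 1 else 0) := by
    intro c
    rw [pvDeg, pvCountP_append_one _ _ _ hp, pvCountP_eq_ite _ (pvNbrs_nodup c)]
    rfl
  have hlast : pvDeg (S ++ [p]) p = pvDeg S p := by
    rw [hdeg]; simp [pvSelf_not_nbr]
  have hstep : pvSumdeg (S ++ [p])
      = (S.map (fun c => pvDeg (S ++ [p]) c)).sum + pvDeg (S ++ [p]) p := by
    rw [pvSumdeg, List.map_append, List.sum_append]
    simp
  rw [hstep, hlast]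
  have hmap : (S.map (fun c => pvDeg (S ++ [p]) c)).sum
      = (S.map (fun c => pvDeg S c)).sum + (S.map (fun c => if p ∈ pvNbrs c then 1 else 0)).sum := by
    simp only [hdeg]
    rw [← List.sum_map_add]
  rw [hmap, pvSum_ite]
  have hcc : S.countP (fun c => decide (p ∈ pvNbrs c)) = S.countP (fun c => decide (c ∈ pvNbrs p)) := by
    apply List.countP_congr
    intro c _
    simp [pvNbrs_symm]
  rw [hcc, pvCountP_mem_comm S (pvNbrs p) hS (pvNbrs_nodup p)]
  unfold pvSumdeg pvDeg
  omega

lemma pvContains_eq (E : List (Int × Int × Int × Int)) (x : Int × Int × Int × Int) :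
    PySem.Set.contains E x = decide (x ∈ E) := by
  simp [PySem.Set.contains]

lemma pvAdd_not_mem (E : List (Int × Int × Int × Int)) (x : Int × Int × Int × Int)
    (h : x ∉ E) : PySem.Set.add E x = E ++ [x] := by
  simp [PySem.Set.add, pvContains_eq, h]

lemma pvInner_id (p : Int × Int) (ns : List (Int × Int)) (E : List (Int × Int × Int × Int))
    (h : ∀ n ∈ ns, (p.1, p.2, n.1, n.2) ∈ E ∨ (n.1, n.2, p.1, p.2) ∈ E) :
    ns.foldl (fun E n =>
      if !(PySem.Set.contains E (p.1, p.2, n.1, n.2)) &&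
         !(PySem.Set.contains E (n.1, n.2, p.1, p.2)) then
        PySem.Set.add E (p.1, p.2, n.1, n.2)
      else E) E = E := by
  induction ns with
  | nil => rfl
  | cons n ns ih =>
    have hn := h n (by simp)
    have hcond : (!(PySem.Set.contains E (p.1, p.2, n.1, n.2)) &&
         !(PySem.Set.contains E (n.1, n.2, p.1, p.2))) = false := by
      rcases hn with hn | hn <;> simp [pvContains_eq, hn]
    simp only [List.foldl_cons, hcond, Bool.false_eq_true, if_false]
    exact ih (fun m hm => h m (by simp [hm]))

lemma pvInner_eq_append (p : Int × Int) (ns : List (Int × Int)) (E : List (Int × Int × Int × Int))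
    (S : List (Int × Int)) (hns : ns.Nodup) (hnp : ∀ n ∈ ns, n ≠ p)
    (h1 : ∀ n ∈ ns, (p.1, p.2, n.1, n.2) ∉ E)
    (h2 : ∀ n ∈ ns, ((n.1, n.2, p.1, p.2) ∈ E ↔ n ∈ S)) :
    ns.foldl (fun E n =>
      if !(PySem.Set.contains E (p.1, p.2, n.1, n.2)) &&
         !(PySem.Set.contains E (n.1, n.2, p.1, p.2)) then
        PySem.Set.add E (p.1, p.2, n.1, n.2)
      else E) E
    = E ++ (ns.filter (fun n => decide (n ∉ S))).map (fun n => (p.1, p.2, n.1, n.2)) := by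
  induction ns generalizing E with
  | nil => simp
  | cons n ns ih =>
    have hpn : (p.1, p.2, n.1, n.2) ∉ E := h1 n (by simp)
    by_cases hnS : n ∈ S
    · -- already-internal neighbour: reversed edge present, nothing added
      have hrev : (n.1, n.2, p.1, p.2) ∈ E := (h2 n (by simp)).mpr hnS
      have hcond : (!(PySem.Set.contains E (p.1, p.2, n.1, n.2)) &&
           !(PySem.Set.contains E (n.1, n.2, p.1, p.2))) = false := by
        simp [pvContains_eq, hrev]
      simp only [List.foldl_cons, hcond, Bool.false_eq_true, if_false, List.filter_cons,
        hnS, not_true, decide_false]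
      have := ih E hns.of_cons (fun m hm => hnp m (by simp [hm]))
        (fun m hm => h1 m (by simp [hm])) (fun m hm => h2 m (by simp [hm]))
      simpa [hnS] using this
    · -- boundary or fresh neighbour: edge added
      have hrev : (n.1, n.2, p.1, p.2) ∉ E := fun hm => hnS ((h2 n (by simp)).mp hm)
      have hcond : (!(PySem.Set.contains E (p.1, p.2, n.1, n.2)) &&
           !(PySem.Set.contains E (n.1, n.2, p.1, p.2))) = true := by
        simp [pvContains_eq, hrev, hpn]
      simp only [List.foldl_cons, hcond, if_true]
      rw [pvAdd_not_mem E _ hpn]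
      have hrec := ih (E ++ [(p.1, p.2, n.1, n.2)]) hns.of_cons
        (fun m hm => hnp m (by simp [hm]))
        (fun m hm => by
          have hmn : m ≠ n := fun h => (List.nodup_cons.mp hns).1 (h ▸ hm)
          simp only [List.mem_append, List.mem_singleton]
          rintro (hin | heq)
          · exact h1 m (by simp [hm]) hin
          · apply hmn
            have hmn2 : m.1 = n.1 ∧ m.2 = n.2 := by simpa [Prod.ext_iff] using heq
            exact Prod.ext hmn2.1 hmn2.2)
        (fun m hm => by
          rw [List.mem_append]
          constructor
          · rintro (hin | hin)
            · exact (h2 m (by simp [hm])).mp hin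
            · exfalso
              simp [Prod.ext_iff] at hin
              exact hnp m (by simp [hm]) (Prod.ext hin.1 hin.2.1)
          · intro hmS
            exact Or.inl ((h2 m (by simp [hm])).mpr hmS))
      rw [hrec]
      simp [hnS, List.filter_cons]

lemma pvAStep_eq_nbrs_fold (E : PySem.Set (Int × Int × Int × Int)) (p : Int × Int) :
    pvAStep E p = (pvNbrs p).foldl (fun E n =>
      if !(PySem.Set.contains E (p.1, p.2, n.1, n.2)) &&
         !(PySem.Set.contains E (n.1, n.2, p.1, p.2)) then
        PySem.Set.add E (p.1, p.2, n.1, n.2)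
      else E) E := by
  rw [pvAStep, pvNbrs, List.foldl_map]

lemma pvStep_Inv (S : List (Int × Int)) (E : PySem.Set (Int × Int × Int × Int)) (p : Int × Int)
    (h : pvInv S E) : pvInv (PySem.Set.add S p) (pvAStep E p) := by
  obtain ⟨hSnd, hEnd, hmem, hflip, hcov, hlen⟩ := h
  by_cases hp : p ∈ S
  · -- p already processed: nothing changes
    have hadd : PySem.Set.add S p = S := by simp [PySem.Set.add, PySem.Set.contains, hp]
    have hstep : pvAStep E p = E := by
      rw [pvAStep_eq_nbrs_fold]
      exact pvInner_id p (pvNbrs p) E (fun n hn => hcov p hp n hn)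
    rw [hadd, hstep]
    exact ⟨hSnd, hEnd, hmem, hflip, hcov, hlen⟩
  · -- new cell p
    have hadd : PySem.Set.add S p = S ++ [p] := by
      simp [PySem.Set.add, PySem.Set.contains, hp]
    have h1 : ∀ n ∈ pvNbrs p, (p.1, p.2, n.1, n.2) ∉ E := by
      intro n _ hin
      exact hp (hmem _ hin).1
    have h2 : ∀ n ∈ pvNbrs p, ((n.1, n.2, p.1, p.2) ∈ E ↔ n ∈ S) := by
      intro n hn
      constructor
      · intro hin
        exact (hmem _ hin).1
      · intro hnS
        rcases hcov n hnS p ((pvNbrs_symm p n).mp hn) with hin | hin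
        · exact hin
        · exact absurd hin (h1 n hn)
    have hnp : ∀ n ∈ pvNbrs p, n ≠ p := by
      intro n hn heq
      exact pvSelf_not_nbr p (heq ▸ hn)
    have hstep : pvAStep E p
        = E ++ ((pvNbrs p).filter (fun n => decide (n ∉ S))).map (fun n => (p.1, p.2, n.1, n.2)) := by
      rw [pvAStep_eq_nbrs_fold]
      exact pvInner_eq_append p (pvNbrs p) E S (pvNbrs_nodup p) hnp h1 h2
    rw [hadd, hstep]
    set M := ((pvNbrs p).filter (fun n => decide (n ∉ S))).map (fun n => (p.1, p.2, n.1, n.2)) with hM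
    have hMc : ∀ e ∈ M, ∃ n, n ∈ pvNbrs p ∧ n ∉ S ∧ e = (p.1, p.2, n.1, n.2) := by
      intro e he
      rw [hM] at he
      simp only [List.mem_map, List.mem_filter, decide_eq_true_eq] at he
      obtain ⟨n, ⟨hn1, hn2⟩, hn3⟩ := he
      exact ⟨n, hn1, hn2, hn3.symm⟩
    have hEM : ∀ e ∈ E, e ∉ M := by
      intro e he hem
      obtain ⟨n, _, _, rfl⟩ := hMc e hem
      exact hp (hmem _ he).1
    refine ⟨?_, ?_, ?_, ?_, ?_, ?_⟩
    · rw [List.nodup_append]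
      refine ⟨hSnd, List.nodup_singleton p, ?_⟩
      intro a ha b hb
      simp only [List.mem_singleton] at hb
      subst hb
      exact fun h => hp (h ▸ ha)
    · rw [List.nodup_append]
      refine ⟨hEnd, ?_, ?_⟩
      · rw [hM]
        apply List.Nodup.map_on
        · intro x hx y hy hxy
          have e1 : x.1 = y.1 := congrArg (fun t => t.2.2.1) hxy
          have e2 : x.2 = y.2 := congrArg (fun t => t.2.2.2) hxy
          exact Prod.ext e1 e2
        · exact (pvNbrs_nodup p).filter _
      · intro e he em hem heq
        exact hEM e he (heq ▸ hem)
    · intro e he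
      rcases List.mem_append.mp he with he | he
      · exact ⟨List.mem_append_left _ (hmem _ he).1, (hmem _ he).2⟩
      · obtain ⟨n, hn1, _, rfl⟩ := hMc e he
        exact ⟨by simp, hn1⟩
    · intro e he hfe
      rcases List.mem_append.mp he with he | he
      · rcases List.mem_append.mp hfe with hfe | hfe
        · exact hflip e he hfe
        · obtain ⟨n, _, hn2, heq⟩ := hMc _ hfe
          apply hn2
          have hS' : (e.1, e.2.1) ∈ S := (hmem _ he).1
          have he1 : e.1 = n.1 := congrArg (fun t => t.2.2.1) heq
          have he2 : e.2.1 = n.2 := congrArg (fun t => t.2.2.2) heq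
          rw [he1, he2] at hS'
          exact hS'
      · obtain ⟨n, hn1, hn2, rfl⟩ := hMc _ he
        simp only at hfe
        rcases List.mem_append.mp hfe with hfe | hfe
        · exact hn2 (hmem _ hfe).1
        · obtain ⟨m, hm1, _, heq⟩ := hMc _ hfe
          apply pvSelf_not_nbr p
          have g1 : n.1 = p.1 := congrArg (fun t => t.1) heq
          have g2 : n.2 = p.2 := congrArg (fun t => t.2.1) heq
          have : n = p := Prod.ext g1 g2
          exact this ▸ hn1
    · intro c hc n hn
      rcases List.mem_append.mp hc with hc | hc
      · rcases hcov c hc n hn with hin | hin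
        · exact Or.inl (List.mem_append_left _ hin)
        · exact Or.inr (List.mem_append_left _ hin)
      · have hcp : c = p := by simpa using hc
        subst hcp
        by_cases hnS : n ∈ S
        · exact Or.inr (List.mem_append_left _ ((h2 n hn).mpr hnS))
        · refine Or.inl (List.mem_append_right _ ?_)
          rw [hM]
          simp only [List.mem_map, List.mem_filter, decide_eq_true_eq]
          exact ⟨n, ⟨hn, hnS⟩, rfl⟩
    · have hMlen : M.length = 4 - pvDeg S p := by
        rw [hM, List.length_map, ← List.countP_eq_length_filter]
        calc (pvNbrs p).countP (fun n => decide (n ∉ S))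
            = (pvNbrs p).countP (fun n => !(decide (n ∈ S))) := by
              apply List.countP_congr
              intro x _
              simp
          _ = 4 - pvDeg S p := by
              rw [pvCountP_not]
              rfl
      have hdle : pvDeg S p ≤ 4 := by
        have h4 : (pvNbrs p).length = 4 := rfl
        exact h4 ▸ (List.countP_le_length : pvDeg S p ≤ (pvNbrs p).length)
      rw [pvSumdeg_append S p hSnd hp]
      simp only [List.length_append, List.length_singleton, hMlen]
      omega

lemma pvFold_Inv (l : List (Int × Int)) (S : List (Int × Int))
    (E : PySem.Set (Int × Int × Int × Int)) (h : pvInv S E) :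
    pvInv (l.foldl PySem.Set.add S) (l.foldl pvAStep E) := by
  induction l generalizing S E with
  | nil => exact h
  | cons p l ih => exact ih _ _ (pvStep_Inv S E p h)

lemma pvTotal_eq (cells : List (Int × Int)) :
    (cells.foldl (fun total c =>
      pvDirs.foldl (fun total d =>
        if PySem.Set.contains cells (c.1 + d.1, c.2 + d.2) then total + 1 else total) total)
      (0 : Int)) = (pvSumdeg cells : Int) := by
  have hinner : ∀ (c : Int × Int) (t : Int),
      pvDirs.foldl (fun total d =>
        if PySem.Set.contains cells (c.1 + d.1, c.2 + d.2) then total + 1 else total) t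
      = t + (pvDeg cells c : Int) := by
    intro c t
    have hbridge : pvDirs.foldl (fun total d =>
        if PySem.Set.contains cells (c.1 + d.1, c.2 + d.2) then total + 1 else total) t
        = (pvNbrs c).foldl (fun total n =>
            if PySem.Set.contains cells n then total + 1 else total) t := by
      rw [pvNbrs, List.foldl_map]
    rw [hbridge, PySem.List.foldl_if_add_one]
    congr 1
    rw [pvDeg]
    congr 1
    apply List.countP_congr
    intro x _
    simp
  have houter := PySem.List.foldl_congr_mem' (l := cells) (init := (0 : Int))
    (f := fun total c =>
      pvDirs.foldl (fun total d =>
        if PySem.Set.contains cells (c.1 + d.1, c.2 + d.2) then total + 1 else total) total)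
    (g := fun total c => total + (pvDeg cells c : Int))
    (fun c _ t => hinner c t)
  rw [houter]
  rw [PySem.List.foldl_add (g := fun c => (pvDeg cells c : Int))]
  rw [pvSumdeg, Nat.cast_list_sum, List.map_map, zero_add]
  rfl

-- ===== VERDICT (by name: the statement is the Claim_ definition above) =====
theorem calculate_sides_spec : Claim_equal_calculate_sides := by
  unfold Claim_equal_calculate_sides Spec_calculate_sides
  intro region _

  have hbase : pvInv [] [] :=
    ⟨List.nodup_nil, List.nodup_nil, by simp, by simp, by simp, by simp [pvSumdeg]⟩
  have hInv := pvFold_Inv region [] [] hbase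
  have hcells : region.foldl PySem.Set.add [] = PySem.Set.ofList region := by
    rw [PySem.Set.ofList_eq_foldl]
  rw [hcells] at hInv
  obtain ⟨-, -, -, -, -, hlen⟩ := hInv
  unfold calculate_sides calculate_sides_alt
  dsimp only
  rw [pvTotal_eq]
  rw [PySem.Int.floordiv_eq_ediv_of_pos (by norm_num : (0:Int) < 2)]
  show ((region.foldl pvAStep ([] : PySem.Set (Int × Int × Int × Int))).length : Int) = _
  rw [PySem.Set.len]
  omega
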